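-- pv_equiv track=rewrite | github.com/Craftguy-Billies/AutoNews | finale.py | split_on_every_nth_h2
-- ===== SOURCE A (Python) =====
-- def split_on_every_nth_h2(json_array, n=2):
--     count_headers = 0
--     current_subarray = []
--     all_subarrays = []
--
--     for element in json_array:
--         if 'h2' in element or 'h3' in element:
--             count_headers += 1
--             if count_headers == n:
--                 # When the nth 'h2' or 'h3' is encountered, store the current subarray and start a new one
--                 all_subarrays.append(current_subarray)
--                 current_subarray = [element]
--                 count_headers = 0
--             else:
--                 current_subarray.append(element)
--         else:
--             current_subarray.append(element)
--
--     # Don't forget to add the last subarray if it has any elements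
--     if current_subarray:
--         all_subarrays.append(current_subarray)
--
--     return all_subarrays
-- ===== SOURCE B (Python) =====
-- def split_on_every_nth_h2(json_array, n=2):
--     if not json_array:
--         return []
--     cuts = []
--     count = 0
--     for i, element in enumerate(json_array):
--         if 'h2' in element or 'h3' in element:
--             count += 1
--             if count == n:
--                 cuts.append(i)
--                 count = 0
--     starts = [0] + cuts
--     stops = cuts + [len(json_array)]
--     return [json_array[a:b] for a, b in zip(starts, stops)]
-- ===== Notes on version B (the rewrite author's own statement) =====
-- stated objective: alternative
-- what changed: B replaces A's loop that accumulates the current subarray and the list of subarrays by a single pass collecting cut indices followed by slicing json_array between consecutive cuts (with an explicit empty-input guard).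
import Mathlib
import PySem

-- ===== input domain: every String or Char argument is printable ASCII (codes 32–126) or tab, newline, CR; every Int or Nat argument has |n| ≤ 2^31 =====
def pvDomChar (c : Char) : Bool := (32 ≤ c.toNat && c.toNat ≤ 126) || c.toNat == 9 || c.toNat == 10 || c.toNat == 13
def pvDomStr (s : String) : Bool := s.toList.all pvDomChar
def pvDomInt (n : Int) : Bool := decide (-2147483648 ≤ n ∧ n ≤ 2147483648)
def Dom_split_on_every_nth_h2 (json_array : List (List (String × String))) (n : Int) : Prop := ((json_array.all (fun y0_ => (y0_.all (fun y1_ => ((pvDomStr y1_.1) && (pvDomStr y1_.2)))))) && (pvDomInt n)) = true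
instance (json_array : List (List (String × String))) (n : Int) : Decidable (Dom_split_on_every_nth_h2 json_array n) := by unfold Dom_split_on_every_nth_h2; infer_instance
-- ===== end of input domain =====

-- B replaces A's subarray-accumulator loop by one pass that records cut indices and then slices
-- the array between consecutive cuts (objective: alternative decomposition, same cost).

-- ===== PORT A =====
-- 'h2' in element / 'h3' in element : key membership in the dict (association list)
def pvHasHdr (e : List (String × String)) : Bool :=
  e.any (fun kv => kv.1 == "h2") || e.any (fun kv => kv.1 == "h3")

-- one iteration of A's for-loop: state = (count_headers, current_subarray, all_subarrays)
def pvStepA (n : Int)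
    (st : Int × List (List (String × String)) × List (List (List (String × String))))
    (e : List (String × String)) :
    Int × List (List (String × String)) × List (List (List (String × String))) :=
  let (c, cur, all) := st
  if pvHasHdr e then
    let c := c + 1
    if c == n then (0, [e], all ++ [cur])
    else (c, cur ++ [e], all)
  else (c, cur ++ [e], all)

def split_on_every_nth_h2 (json_array : List (List (String × String))) (n : Int) :
    List (List (List (String × String))) :=
  let st := json_array.foldl (pvStepA n) (0, [], [])
  if st.2.1.isEmpty then st.2.2 else st.2.2 ++ [st.2.1]

-- ===== PORT B =====
-- one iteration of B's for-loop over enumerate: state = (count, cuts)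
def pvStepB (n : Int) (st : Int × List Int) (ie : Int × List (String × String)) :
    Int × List Int :=
  let (c, cuts) := st
  if pvHasHdr ie.2 then
    let c := c + 1
    if c == n then (0, cuts ++ [ie.1])
    else (c, cuts)
  else (c, cuts)

def split_on_every_nth_h2_alt (json_array : List (List (String × String))) (n : Int) :
    List (List (List (String × String))) :=
  if json_array.isEmpty then []
  else
    let cuts := ((PySem.List.enumerate json_array).foldl (pvStepB n) (0, [])).2
    let starts := 0 :: cuts
    let stops := cuts ++ [PySem.List.len json_array]
    (starts.zip stops).map (fun ab => PySem.List.slice json_array (some ab.1) (some ab.2))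

-- ===== PRECONDITION & SPEC =====
def Spec_split_on_every_nth_h2 (json_array : List (List (String × String))) (n : Int) (out : List (List (List (String × String)))) : Prop := out = split_on_every_nth_h2_alt json_array n
instance (json_array : List (List (String × String))) (n : Int) (out : List (List (List (String × String)))) : Decidable (Spec_split_on_every_nth_h2 json_array n out) := by unfold Spec_split_on_every_nth_h2; infer_instance

-- ===== CLAIM (what is proved, stated in full; the proofs are below) =====
def Claim_equal_split_on_every_nth_h2 : Prop := ∀ (json_array : List (List (String × String))) (n : Int), Dom_split_on_every_nth_h2 json_array n → Spec_split_on_every_nth_h2 json_array n (split_on_every_nth_h2 json_array n)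

-- ===== LEMMAS AND PROOFS =====

-- zip of (a :: cs) with (cs ++ [L]) appends the pair (last start, L)
theorem pv_zip_snoc {α : Type} (cs : List α) (a L : α) :
    (a :: cs).zip (cs ++ [L]) = (a :: cs).zip cs ++ [(cs.getLastD a, L)] := by
  induction cs generalizing a with
  | nil => simp
  | cons c cs ih =>
    simp [List.zip_cons_cons, ih c, List.getLast?_cons, List.getLastD_eq_getLast?]

-- same with the new cut also appended to the starts list
theorem pv_zip_snoc' {α : Type} (cs : List α) (a L : α) :
    (a :: (cs ++ [L])).zip (cs ++ [L]) = (a :: cs).zip cs ++ [(cs.getLastD a, L)] := by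
  induction cs generalizing a with
  | nil => simp
  | cons c cs ih =>
    simp [List.zip_cons_cons, ih c, List.getLast?_cons, List.getLastD_eq_getLast?]

-- the joint loop invariant, proved by induction on the list from the back
theorem pv_inv (n : Int) (xs : List (List (String × String))) :
    let sA := xs.foldl (pvStepA n) (0, [], [])
    let sB := (PySem.List.enumerate xs).foldl (pvStepB n) (0, [])
    sA.1 = sB.1 ∧
    (∀ i ∈ sB.2, 0 ≤ i ∧ i.toNat < xs.length) ∧
    sA.2.2 = ((0 :: sB.2).zip sB.2).map
      (fun ab => (xs.take ab.2.toNat).drop ab.1.toNat) ∧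
    sA.2.1 = xs.drop (sB.2.getLastD 0).toNat := by
  induction xs using List.reverseRecOn with
  | nil => simp [PySem.List.enumerate]
  | append_singleton ys e ih =>
    obtain ⟨hc, hb, hall, hcur⟩ := ih
    have hlast : ∀ cs : List Int, (∀ i ∈ cs, 0 ≤ i ∧ i.toNat < ys.length) →
        (cs.getLastD 0).toNat ≤ ys.length := by
      intro cs h
      rcases hl : cs.getLast? with _ | x
      · simp [List.getLastD_eq_getLast?, hl]
      · have := h x (List.mem_of_getLast? hl)
        simp [List.getLastD_eq_getLast?, hl]; omega
    rw [PySem.List.enumerate_append] at *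
    simp only [List.foldl_append, List.foldl_cons, List.foldl_nil,
      PySem.List.enumerate_cons, PySem.List.enumerate_nil] at *
    set sA := ys.foldl (pvStepA n) (0, [], []) with hsA
    set sB := (PySem.List.enumerate ys 0).foldl (pvStepB n) (0, []) with hsB
    have hle := hlast sB.2 hb
    -- facts used by every branch
    have htake : ∀ b : Int, 0 ≤ b → b.toNat < ys.length →
        (ys ++ [e]).take b.toNat = ys.take b.toNat := by
      intro b _ hb'; rw [List.take_append_of_le_length (by omega)]
    have hdrop : (ys ++ [e]).drop (sB.2.getLastD 0).toNat
        = ys.drop (sB.2.getLastD 0).toNat ++ [e] :=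
      List.drop_append_of_le_length hle
    simp only [pvStepA, pvStepB]
    have hbw : ∀ i ∈ sB.2, 0 ≤ i ∧ i.toNat < (ys ++ [e]).length := by
      intro i hi; have := hb i hi
      refine ⟨this.1, ?_⟩; simp; omega
    have hmap : List.map (fun ab => List.drop ab.1.toNat (List.take ab.2.toNat (ys ++ [e])))
        ((0 :: sB.2).zip sB.2)
        = List.map (fun ab => List.drop ab.1.toNat (List.take ab.2.toNat ys))
        ((0 :: sB.2).zip sB.2) := by
      apply List.map_congr_left
      intro ab hab
      have h2 : ab.2 ∈ sB.2 := List.of_mem_zip hab |>.2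
      have := hb ab.2 h2
      rw [htake ab.2 this.1 this.2]
    by_cases hh : pvHasHdr e = true
    · simp only [if_pos hh]
      rw [hc]
      by_cases hn : (sB.1 + 1 == n) = true
      · simp only [if_pos hn]
        refine ⟨trivial, ?_, ?_, ?_⟩
        · intro i hi
          rcases List.mem_append.mp hi with hi | hi
          · have := hb i hi
            refine ⟨this.1, ?_⟩; simp; omega
          · simp at hi; subst hi
            refine ⟨by simp, by simp⟩
        · rw [pv_zip_snoc', List.map_append]
          congr 1
          · rw [hall, hmap]
          · simp only [List.map_cons, List.map_nil, List.cons.injEq, and_true]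
            rw [hcur]
            have h0 : ((0 : Int) + (ys.length : Int)).toNat = ys.length := by simp
            rw [h0, List.take_left]
        · have h1 : (sB.2 ++ [0 + (ys.length : Int)]).getLastD 0 = (ys.length : Int) := by
            simp
          rw [h1]; simp
      · simp only [if_neg hn]
        exact ⟨trivial, hbw, hall.trans hmap.symm, by rw [hcur, hdrop]⟩
    · simp only [if_neg hh]
      exact ⟨hc, hbw, hall.trans hmap.symm, by rw [hdrop, hcur]⟩

-- ===== VERDICT (by name: the statement is the Claim_ definition above) =====
theorem split_on_every_nth_h2_spec : Claim_equal_split_on_every_nth_h2 := by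
  intro xs n _
  unfold Spec_split_on_every_nth_h2 split_on_every_nth_h2 split_on_every_nth_h2_alt
  obtain ⟨hc, hb, hall, hcur⟩ := pv_inv n xs
  by_cases hx : xs = []
  · subst hx; rfl
  · have hne : xs.isEmpty = false := by simp [hx]
    set sA := xs.foldl (pvStepA n) (0, [], []) with hsA
    set cuts := ((PySem.List.enumerate xs).foldl (pvStepB n) (0, [])).2 with hcuts
    have hlt : (cuts.getLastD 0).toNat < xs.length := by
      rcases hl : cuts.getLast? with _ | x
      · simp only [List.getLastD_eq_getLast?, hl, Option.getD_none, Int.toNat_zero]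
        cases xs with
        | nil => exact absurd rfl hx
        | cons a l => simp
      · have := hb x (List.mem_of_getLast? hl)
        simp only [List.getLastD_eq_getLast?, hl, Option.getD_some]
        omega
    have hcurne : sA.2.1.isEmpty = false := by
      rw [hcur]
      simp only [List.isEmpty_eq_false_iff, ne_eq, List.drop_eq_nil_iff]
      omega
    simp only [hne, hcurne, Bool.false_eq_true, if_false]
    rw [PySem.List.len_eq, pv_zip_snoc, List.map_append, hall, hcur]
    congr 1
    · apply List.map_congr_left
      intro ab hab
      have h1 : ab.1 ∈ (0 : Int) :: cuts := (List.of_mem_zip hab).1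
      have h2 : ab.2 ∈ cuts := (List.of_mem_zip hab).2
      have ha : 0 ≤ ab.1 := by
        rcases List.mem_cons.mp h1 with h | h
        · omega
        · exact (hb ab.1 h).1
      rw [PySem.List.slice_toNat xs ha (hb ab.2 h2).1, List.drop_take]
    · have ha : (0 : Int) ≤ cuts.getLastD 0 := by
        rcases hl : cuts.getLast? with _ | x
        · simp [List.getLastD_eq_getLast?, hl]
        · have := hb x (List.mem_of_getLast? hl)
          simp only [List.getLastD_eq_getLast?, hl, Option.getD_some]
          omega
      rw [List.map_cons, List.map_nil,
        PySem.List.slice_toNat xs ha (Int.natCast_nonneg _)]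
      congr 1
      rw [Int.toNat_natCast]
      exact (List.take_of_length_le (by simp)).symm
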